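-- pv_equiv track=rewrite | github.com/eundeok9/algorithm-study | 프로그래머스/lv0/120812. 최빈값 구하기/최빈값 구하기.py | solution
-- ===== SOURCE A (Python) =====
-- from collections import Counter
--
-- def solution(array):
--     counting = Counter(array).most_common()
--     most_freq = counting[0][1]
--     res = counting[0][0]
--
--     for num, freq in counting:
--         if res != num and most_freq == freq:
--             res = -1
--     return res
-- ===== SOURCE B (Python) =====
-- def solution(array):
--     counts = {}
--     for x in array:
--         counts[x] = counts.get(x, 0) + 1
--     m = max(counts.values())
--     winners = [v for v in counts if counts[v] == m]
--     return winners[0] if len(winners) == 1 else -1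
-- ===== Notes on version B (the rewrite author's own statement) =====
-- stated objective: alternative
-- what changed: B replaces Counter(...).most_common() frequency-sort plus sentinel re-scan with a hand-built count dict, a plain max over the counts and a filter of the values attaining it (unique winner or -1); no sort at all.
import Mathlib
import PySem

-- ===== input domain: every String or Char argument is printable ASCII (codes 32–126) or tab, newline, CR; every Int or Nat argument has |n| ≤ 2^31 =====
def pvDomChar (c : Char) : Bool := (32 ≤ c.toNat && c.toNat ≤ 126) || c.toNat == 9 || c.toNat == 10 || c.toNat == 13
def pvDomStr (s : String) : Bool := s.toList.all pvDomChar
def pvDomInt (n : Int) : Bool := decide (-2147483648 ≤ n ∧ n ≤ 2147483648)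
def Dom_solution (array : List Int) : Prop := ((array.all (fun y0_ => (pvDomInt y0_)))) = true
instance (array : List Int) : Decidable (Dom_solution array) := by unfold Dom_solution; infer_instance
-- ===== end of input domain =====

-- B replaces A's Counter(...).most_common() frequency-sort + sentinel re-scan by a hand-built
-- count dict, a plain max over the counts and a filter of the winning values (no sort); same values.

-- ===== PORT A =====
def solution (array : List Int) : Int :=
  let counting := PySem.List.sorted (PySem.Dict.counter array).items (fun kv => kv.2) true
  match counting with
  | [] => 0   -- unreachable: Python raises IndexError here (excluded by Pre_solution)
  | c0 :: _ =>
      counting.foldl (fun res kv => if res ≠ kv.1 ∧ c0.2 = kv.2 then -1 else res) c0.1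

-- ===== PORT B =====
def solution_alt (array : List Int) : Int :=
  let counts := array.foldl (fun d x => d.insert x (d.getD x 0 + 1)) (PySem.Dict.empty : PySem.Dict Int Int)
  match PySem.List.max? counts.values (fun v => v) with
  | none => 0   -- unreachable: Python raises ValueError here (excluded by Pre_solution)
  | some m =>
      let winners := counts.keys.filter (fun v => counts.getD v 0 == m)
      match winners with
      | [w] => w
      | _ => -1

-- ===== PRECONDITION & SPEC =====
-- Pre_ excludes only the empty list, on which Python A raises IndexError (and B raises ValueError).
def Pre_solution (array : List Int) : Prop := array ≠ []
instance (array : List Int) : Decidable (Pre_solution array) := by unfold Pre_solution; infer_instance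
def pvWitness_solution : List Int := ([1, 2, 2])
def Spec_solution (array : List Int) (out : Int) : Prop := out = solution_alt array
instance (array : List Int) (out : Int) : Decidable (Spec_solution array out) := by unfold Spec_solution; infer_instance

-- ===== CLAIM (what is proved, stated in full; the proofs are below) =====
def Claim_equal_solution : Prop := ∀ (array : List Int), Dom_solution array → Pre_solution array → Spec_solution array (solution array)

-- ===== LEMMAS AND PROOFS =====

-- A's sentinel loop: the result is -1 iff some entry has the max frequency under a different value.
lemma foldl_sentinel (l : List (Int × Int)) (mf init : Int) :
    l.foldl (fun res kv => if res ≠ kv.1 ∧ mf = kv.2 then -1 else res) init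
      = if ∃ kv ∈ l, init ≠ kv.1 ∧ mf = kv.2 then -1 else init := by
  induction l generalizing init with
  | nil => simp
  | cons kv t ih =>
      simp only [List.foldl_cons]
      by_cases h : init ≠ kv.1 ∧ mf = kv.2
      · simp only [if_pos h, ih]
        have : (if ∃ kv' ∈ t, (-1 : Int) ≠ kv'.1 ∧ mf = kv'.2 then (-1 : Int) else -1) = -1 := by
          split <;> rfl
        rw [this, if_pos]
        exact ⟨kv, List.mem_cons_self, h⟩
      · simp only [if_neg h, ih]
        congr 1
        simp only [List.mem_cons, eq_iff_iff]
        constructor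
        · rintro ⟨kv', hm, hp⟩; exact ⟨kv', Or.inr hm, hp⟩
        · rintro ⟨kv', hm, hp⟩
          rcases hm with rfl | hm
          · exact absurd hp h
          · exact ⟨kv', hm, hp⟩

-- filtering a duplicate-free list by a predicate true exactly at a yields [a]
lemma filter_eq_singleton {α : Type} (l : List α) (p : α → Bool) (a : α)
    (hn : l.Nodup) (ha : a ∈ l) (h : ∀ x ∈ l, p x = true ↔ x = a) :
    l.filter p = [a] := by
  induction l with
  | nil => cases ha
  | cons x xs ih =>
      rcases List.nodup_cons.mp hn with ⟨hx, hxs⟩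
      by_cases hxa : x = a
      · subst hxa
        have hpx : p x = true := (h x List.mem_cons_self).mpr rfl
        rw [List.filter_cons_of_pos hpx]
        have : xs.filter p = [] := by
          apply List.filter_eq_nil_iff.mpr
          intro y hy hpy
          exact hx (((h y (List.mem_cons_of_mem _ hy)).mp hpy) ▸ hy)
        rw [this]
      · have hpx : p x = false := by
          rcases Bool.eq_false_or_eq_true (p x) with ht | hf
          · exact absurd ((h x List.mem_cons_self).mp ht) hxa
          · exact hf
        rw [List.filter_cons_of_neg (by simp [hpx])]
        rcases List.mem_cons.mp ha with rfl | ha'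
        · exact absurd rfl hxa
        · exact ih hxs ha' (fun y hy => h y (List.mem_cons_of_mem _ hy))

-- ===== VERDICT (by name: the statement is the Claim_ definition above) =====
theorem solution_spec : Claim_equal_solution := by
  intro array _ hpre
  unfold Spec_solution solution solution_alt
  dsimp only
  have hitems : (PySem.Dict.counter array).items
      = (PySem.Set.ofList array).map (fun k => (k, (array.count k : Int))) :=
    PySem.Dict.items_counter array
  have hvals : (PySem.Dict.counter array).values
      = (PySem.Set.ofList array).map (fun k => (array.count k : Int)) := by
    rw [PySem.Dict.values_eq_map_keys _ (PySem.Dict.nodup_keys_counter array) 0]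
    rw [PySem.Dict.keys_counter]
    exact List.map_congr_left (fun k _ => PySem.Dict.getD_counter array k)
  have hSne : PySem.Set.ofList array ≠ [] := by
    cases array with
    | nil => exact absurd rfl hpre
    | cons a t =>
        intro hnil
        have : a ∈ PySem.Set.ofList (a :: t) := (PySem.Set.mem_ofList _ _).mpr List.mem_cons_self
        rw [hnil] at this; cases this
  have hnodup : (PySem.Set.ofList array).Nodup := PySem.Set.nodup_ofList array
  rw [PySem.Dict.foldl_insert_getD_add_one_eq_counter array, hvals]
  -- the sorted counting list is nonempty; name its head
  rcases hct : PySem.List.sorted (PySem.Dict.counter array).items (fun kv => kv.2) true with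
    _ | ⟨c0, t⟩
  · exact absurd (by simpa [hitems] using (PySem.List.sorted_eq_nil_iff _ _ _).mp hct) hSne
  -- c0 is an item, i.e. a value with its count
  have hc0items : c0 ∈ (PySem.Dict.counter array).items := by
    rw [← PySem.List.mem_sorted (key := fun kv : Int × Int => kv.2) (rev := true), hct]
    exact List.mem_cons_self
  obtain ⟨u, huS, hc0⟩ : ∃ u ∈ PySem.Set.ofList array, (u, (array.count u : Int)) = c0 := by
    rw [hitems] at hc0items
    simpa using hc0items
  have hmax : ∀ y ∈ (PySem.Dict.counter array).items, y.2 ≤ c0.2 :=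
    PySem.List.key_head_sorted_rev_ge _ _ hct
  -- the max over the values equals c0's count
  have hvne : (PySem.Set.ofList array).map (fun k => (array.count k : Int)) ≠ [] := by
    simpa using hSne
  rcases hm : PySem.List.max? ((PySem.Set.ofList array).map (fun k => (array.count k : Int)))
      (fun v => v) with _ | m
  · exact absurd ((PySem.List.max?_eq_none_iff _ _).mp hm) hvne
  have hmmem := PySem.List.max?_mem hm
  have hmmax := PySem.List.max?_isMax hm
  have hmc0 : m = c0.2 := by
    apply le_antisymm
    · obtain ⟨w, hwS, hwm⟩ := List.mem_map.mp hmmem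
      have : ((w, (array.count w : Int)) : Int × Int) ∈ (PySem.Dict.counter array).items := by
        rw [hitems]; exact List.mem_map.mpr ⟨w, hwS, rfl⟩
      simpa [hwm] using hmax _ this
    · have : c0.2 ∈ (PySem.Set.ofList array).map (fun k => (array.count k : Int)) :=
        List.mem_map.mpr ⟨u, huS, by rw [← hc0]⟩
      exact hmmax _ this
  subst hmc0
  have hcu : (array.count u : Int) = c0.2 := by rw [← hc0]
  have hu1 : c0.1 = u := by rw [← hc0]
  -- rewrite A's loop
  dsimp only
  rw [foldl_sentinel]
  -- rewrite B's winners list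
  have hwinners : ((PySem.Dict.counter array).keys).filter
        (fun v => (PySem.Dict.counter array).getD v 0 == c0.2)
      = (PySem.Set.ofList array).filter (fun v => (array.count v : Int) == c0.2) := by
    rw [PySem.Dict.keys_counter]
    exact List.filter_congr (fun v _ => by rw [PySem.Dict.getD_counter])
  simp only [hwinners]
  -- membership in the counting list, as a statement about distinct values
  have hmem : (∃ kv ∈ c0 :: t, c0.1 ≠ kv.1 ∧ c0.2 = kv.2) ↔
      (∃ v ∈ PySem.Set.ofList array, c0.1 ≠ v ∧ c0.2 = (array.count v : Int)) := by
    rw [← hct]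
    constructor
    · rintro ⟨kv, hkv, hne, hfq⟩
      rw [PySem.List.mem_sorted, hitems] at hkv
      obtain ⟨v, hvS, rfl⟩ := List.mem_map.mp hkv
      exact ⟨v, hvS, hne, hfq⟩
    · rintro ⟨v, hvS, hne, hfq⟩
      refine ⟨(v, (array.count v : Int)), ?_, hne, hfq⟩
      rw [PySem.List.mem_sorted, hitems]
      exact List.mem_map.mpr ⟨v, hvS, rfl⟩
  by_cases htie : ∃ v ∈ PySem.Set.ofList array, c0.1 ≠ v ∧ c0.2 = (array.count v : Int)
  · rw [if_pos (hmem.mpr htie)]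
    obtain ⟨v, hvS, hne, hfq⟩ := htie
    have huW : u ∈ (PySem.Set.ofList array).filter (fun v => (array.count v : Int) == c0.2) :=
      List.mem_filter.mpr ⟨huS, by simp [hcu]⟩
    have hvW : v ∈ (PySem.Set.ofList array).filter (fun v => (array.count v : Int) == c0.2) :=
      List.mem_filter.mpr ⟨hvS, by simp [← hfq]⟩
    have huv : u ≠ v := by rw [← hu1]; exact hne
    cases hw : (PySem.Set.ofList array).filter (fun v => (array.count v : Int) == c0.2) with
    | nil => simp [hw] at huW
    | cons w rest =>
        cases rest with
        | nil =>
            rw [hw] at huW hvW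
            simp only [List.mem_singleton] at huW hvW
            exact absurd (huW.trans hvW.symm) huv
        | cons w2 rest2 => rfl
  · rw [if_neg (fun h => htie (hmem.mp h))]
    have hfil : (PySem.Set.ofList array).filter (fun v => (array.count v : Int) == c0.2) = [u] := by
      apply filter_eq_singleton _ _ _ hnodup huS
      intro x hxS
      simp only [beq_iff_eq]
      constructor
      · intro hxm
        by_contra hxu
        exact htie ⟨x, hxS, by rw [hu1]; exact fun h => hxu h.symm, hxm.symm⟩
      · rintro rfl; exact hcu
    rw [hfil]
    exact hu1
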